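-- pv_equiv track=rewrite | github.com/brandonraynor95/langflow | src/backend/base/langflow/services/database/models/deployment/exceptions.py | _clean_guard_detail
-- ===== SOURCE A (Python) =====
-- _DETAIL_TRUNCATION_MARKERS = (
--     " [SQL:",
--     "\n[SQL:",
--     " (Background on this error at:",
--     "\n(Background on this error at:",
-- )
--
-- def _clean_guard_detail(detail: str) -> str:
--     cleaned = detail.strip()
--     for marker in _DETAIL_TRUNCATION_MARKERS:
--         if marker in cleaned:
--             cleaned = cleaned.split(marker, 1)[0].strip()
--     # Keep only the first line for wrapped DB error strings.
--     if "\n" in cleaned: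
--         cleaned = cleaned.split("\n", 1)[0].strip()
--     return cleaned
-- ===== SOURCE B (Python) =====
-- _DETAIL_TRUNCATION_MARKERS = (
--     " [SQL:",
--     "\n[SQL:",
--     " (Background on this error at:",
--     "\n(Background on this error at:",
-- )
-- _CUT_CANDIDATES = _DETAIL_TRUNCATION_MARKERS + ("\n",)
--
-- def _clean_guard_detail(detail: str) -> str:
--     cleaned = detail.strip()
--     # single left-to-right scan: cut at the first position where any candidate starts
--     for i in range(len(cleaned)):
--         if any(cleaned.startswith(c, i) for c in _CUT_CANDIDATES):
--             return cleaned[:i].rstrip()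
--     return cleaned
-- ===== Notes on version B (the rewrite author's own statement) =====
-- stated objective: alternative
-- what changed: Replaces the iterative cut-and-restrip pipeline (four sequential marker splits plus a final newline split, re-stripping after each) with a single left-to-right scan that finds the first position where any of the five cut candidates (the four markers or a bare newline) starts, then slices once and rstrips once.
import Mathlib
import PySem

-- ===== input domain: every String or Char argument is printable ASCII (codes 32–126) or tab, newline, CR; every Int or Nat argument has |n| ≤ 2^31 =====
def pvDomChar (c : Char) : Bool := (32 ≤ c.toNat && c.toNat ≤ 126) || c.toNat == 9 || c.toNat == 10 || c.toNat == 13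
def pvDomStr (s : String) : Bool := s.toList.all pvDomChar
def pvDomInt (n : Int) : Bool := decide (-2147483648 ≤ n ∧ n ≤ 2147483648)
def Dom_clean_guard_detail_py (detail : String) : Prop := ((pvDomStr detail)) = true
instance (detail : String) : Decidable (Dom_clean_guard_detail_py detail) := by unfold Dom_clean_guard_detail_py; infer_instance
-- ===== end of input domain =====

-- B replaces A's iterative cut-and-restrip pipeline (four marker splits plus a final
-- newline split, each followed by a fresh strip) with a single left-to-right scan for
-- the first position where any cut candidate starts, then one slice and one rstrip.

-- ===== PORT A =====
def pvMarkers : List String :=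
  [" [SQL:", "\n[SQL:", " (Background on this error at:", "\n(Background on this error at:"]

-- one iteration of A's marker loop: 'if marker in cleaned: cleaned = cleaned.split(marker, 1)[0].strip()'
def pvCutStep (cleaned : String) (marker : String) : String :=
  if PySem.Str.isIn marker cleaned then
    PySem.Str.strip (((PySem.Str.splitMax? cleaned marker 1).getD []).getD 0 "")
  else cleaned

def clean_guard_detail_py (detail : String) : String :=
  let cleaned := PySem.Str.strip detail
  let cleaned := pvMarkers.foldl pvCutStep cleaned
  if PySem.Str.isIn "\n" cleaned then
    PySem.Str.strip (((PySem.Str.splitMax? cleaned "\n" 1).getD []).getD 0 "")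
  else cleaned

-- ===== PORT B =====
def pvCandidates : List (List Char) :=
  [" [SQL:".toList, "\n[SQL:".toList, " (Background on this error at:".toList,
   "\n(Background on this error at:".toList, "\n".toList]

-- B's scan: 'for i in range(len(cleaned)): if any(cleaned.startswith(c, i) for c in candidates): return i'
def pvFindCut : List Char → Nat → Option Nat
  | [], _ => none
  | c :: rest, i =>
      if pvCandidates.any (fun p => p.isPrefixOf (c :: rest)) then some i
      else pvFindCut rest (i + 1)

def clean_guard_detail_py_alt (detail : String) : String :=
  let cleaned := PySem.Str.strip detail
  match pvFindCut cleaned.toList 0 with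
  | some i => String.ofList (PySem.Chars.rstrip (cleaned.toList.take i))
  | none => cleaned

-- ===== PRECONDITION & SPEC =====
def Spec_clean_guard_detail_py (detail : String) (out : String) : Prop := out = clean_guard_detail_py_alt detail
instance (detail : String) (out : String) : Decidable (Spec_clean_guard_detail_py detail out) := by unfold Spec_clean_guard_detail_py; infer_instance

-- ===== CLAIM (what is proved, stated in full; the proofs are below) =====
def Claim_equal_clean_guard_detail_py : Prop := ∀ (detail : String), Dom_clean_guard_detail_py detail → Spec_clean_guard_detail_py detail (clean_guard_detail_py detail)

-- ===== LEMMAS AND PROOFS =====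

-- ---- generic facts about rstrip / lstrip ----

theorem pvDropWhileIdem (p : Char → Bool) (l : List Char) :
    List.dropWhile p (List.dropWhile p l) = List.dropWhile p l := by
  apply List.dropWhile_eq_self_iff.mpr
  intro hl
  have hne : List.dropWhile p l ≠ [] := List.ne_nil_of_length_pos hl
  have h := List.head_dropWhile_not p hne
  rw [List.head_eq_getElem, Bool.eq_false_iff] at h
  exact h

theorem pvRstripDecomp (s : List Char) :
    ∃ ws, s = PySem.Chars.rstrip s ++ ws ∧ ∀ c ∈ ws, PySem.Chars.isspace c := by
  refine ⟨(List.takeWhile PySem.Chars.isspace s.reverse).reverse, ?_, ?_⟩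
  · have h := congrArg List.reverse
      (List.takeWhile_append_dropWhile (p := PySem.Chars.isspace) (l := s.reverse))
    rw [List.reverse_append, List.reverse_reverse] at h
    rw [PySem.Chars.rstrip]
    exact h.symm
  · intro c hc
    exact List.mem_takeWhile_imp (by simpa using hc)

theorem pvRstripIdem (s : List Char) :
    PySem.Chars.rstrip (PySem.Chars.rstrip s) = PySem.Chars.rstrip s := by
  simp [PySem.Chars.rstrip, List.reverse_reverse, pvDropWhileIdem]

theorem pvRstripAppendWs (xs ys : List Char) (h : ∀ c ∈ ys, PySem.Chars.isspace c) :
    PySem.Chars.rstrip (xs ++ ys) = PySem.Chars.rstrip xs := by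
  have hnil : List.dropWhile PySem.Chars.isspace ys.reverse = [] :=
    List.dropWhile_eq_nil_iff.mpr (fun c hc => h c (by simpa using hc))
  simp [PySem.Chars.rstrip, List.reverse_append, List.dropWhile_append, hnil]

theorem pvRstripPrefix (s : List Char) : PySem.Chars.rstrip s <+: s := by
  rw [PySem.Chars.rstrip]
  conv_rhs => rw [← s.reverse_reverse]
  exact List.reverse_prefix.mpr (List.dropWhile_suffix _)

theorem pvRstripLen (s : List Char) : (PySem.Chars.rstrip s).length ≤ s.length :=
  (pvRstripPrefix s).length_le

theorem pvLstripPrefixFix (y z : List Char) (hy : PySem.Chars.lstrip y = y) (h : z <+: y) :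
    PySem.Chars.lstrip z = z := by
  rw [PySem.Chars.lstrip] at hy ⊢
  apply List.dropWhile_eq_self_iff.mpr
  intro hl
  have hly : 0 < y.length := lt_of_lt_of_le hl h.length_le
  have hzy : z[0]'hl = y[0]'hly := List.IsPrefix.getElem h hl
  rw [hzy]
  exact List.dropWhile_eq_self_iff.mp hy hly

theorem pvLstripTake (y : List Char) (n : Nat) (hy : PySem.Chars.lstrip y = y) :
    PySem.Chars.lstrip (y.take n) = y.take n :=
  pvLstripPrefixFix y (y.take n) hy (List.take_prefix n y)

theorem pvStripLstrip (x : List Char) :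
    PySem.Chars.lstrip (PySem.Chars.strip x) = PySem.Chars.strip x := by
  rw [PySem.Chars.strip]
  exact pvLstripPrefixFix (PySem.Chars.lstrip x) _
    (by rw [PySem.Chars.lstrip]; exact pvDropWhileIdem _ _) (pvRstripPrefix _)

theorem pvStripRstrip (x : List Char) :
    PySem.Chars.rstrip (PySem.Chars.strip x) = PySem.Chars.strip x := by
  rw [PySem.Chars.strip]
  exact pvRstripIdem _

-- ---- prefix / infix bookkeeping ----

theorem pvInfixIffDrop (t l : List Char) : t <:+: l ↔ ∃ q, t <+: l.drop q := by
  constructor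
  · intro h
    obtain ⟨pre, post, rfl⟩ := h
    exact ⟨pre.length, by simp⟩
  · rintro ⟨q, h⟩
    exact h.isInfix.trans (l.drop_suffix q).isInfix

theorem pvPrefixTakeDrop (W p : List Char) (L q : Nat) (hp : p ≠ []) :
    p <+: (W.take L).drop q ↔ p <+: W.drop q ∧ q + p.length ≤ L := by
  have hlen : 0 < p.length := List.length_pos_of_ne_nil hp
  rw [List.drop_take, List.prefix_take_iff]
  constructor
  · rintro ⟨h1, h2⟩; exact ⟨h1, by omega⟩
  · rintro ⟨h1, h2⟩; exact ⟨h1, by omega⟩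

theorem pvLastCharBound (x a ws m : List Char) (q : Nat) (hx : x = a ++ ws)
    (hws : ∀ c ∈ ws, PySem.Chars.isspace c) (hm : m <+: x.drop q) (hne : m ≠ [])
    (hlast : PySem.Chars.isspace (m.getLastD 'x') = false) : q + m.length ≤ a.length := by
  by_contra hgt
  have hmlen : 0 < m.length := List.length_pos_of_ne_nil hne
  have hdl : m.length ≤ (x.drop q).length := hm.length_le
  rw [List.length_drop] at hdl
  have hxlen : q + m.length ≤ x.length := by omega
  have hmi : m.length - 1 < m.length := by omega
  have hdi : m.length - 1 < (x.drop q).length := by rw [List.length_drop]; omega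
  have hxi : q + (m.length - 1) < x.length := by omega
  have h1 : m[m.length - 1]'hmi = x[q + (m.length - 1)]'hxi := by
    rw [List.IsPrefix.getElem hm hmi, List.getElem_drop]
  have hlastd : m.getLastD 'x' = m[m.length - 1]'hmi := by
    rw [← List.getLast_eq_getElem hne, List.getLastD_eq_getLast?,
      List.getLast?_eq_getLast hne]
    rfl
  have hai : a.length ≤ q + (m.length - 1) := by omega
  have hwsi : q + (m.length - 1) - a.length < ws.length := by
    subst hx; rw [List.length_append] at hxi; omega
  have h2 : x[q + (m.length - 1)]'hxi = ws[q + (m.length - 1) - a.length]'hwsi := by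
    subst hx; rw [List.getElem_append_right hai]
  have hsp := hws _ (List.getElem_mem hwsi)
  rw [← h2, ← h1, ← hlastd, hlast] at hsp
  exact Bool.false_ne_true hsp

-- ---- the candidate set: no candidate starts strictly inside another's text ----

theorem pvNoOverlapTable : ∀ c ∈ pvCandidates, ∀ c' ∈ pvCandidates, ∀ t ∈ List.range c.length,
    0 < t → ¬ (c.drop t <+: c' ∨ c' <+: c.drop t) := by decide

theorem pvCandidatesNeNil : ∀ c ∈ pvCandidates, c ≠ [] := by decide

theorem pvOverlapFalse (W c c' : List Char) (hc : c ∈ pvCandidates) (hc' : c' ∈ pvCandidates)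
    (q r : Nat) (h1 : c <+: W.drop q) (h2 : c' <+: W.drop r) (hqr : q < r)
    (hrange : r < q + c.length) : False := by
  have hd : c.drop (r - q) <+: W.drop r := by
    have h := h1.drop (r - q)
    rwa [List.drop_drop, show q + (r - q) = r by omega] at h
  exact pvNoOverlapTable c hc c' hc' (r - q) (List.mem_range.mpr (by omega)) (by omega)
    (List.prefix_or_prefix_of_prefix hd h2)

-- ---- first-occurrence function and the split head ----

def pvFirstOcc (sep : List Char) : List Char → Option Nat
  | [] => none
  | c :: rest => if sep.isPrefixOf (c :: rest) then some 0 else (pvFirstOcc sep rest).map (· + 1)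

theorem pvFirstOccNone (sep l : List Char) (hsep : sep ≠ []) (h : pvFirstOcc sep l = none) :
    ∀ j, ¬ sep <+: l.drop j := by
  induction l with
  | nil => intro j hp; rw [List.drop_nil] at hp; exact hsep (List.prefix_nil.mp hp)
  | cons c rest ih =>
    intro j
    rw [pvFirstOcc] at h
    by_cases hp : sep.isPrefixOf (c :: rest)
    · rw [if_pos hp] at h; cases h
    · rw [if_neg hp] at h
      rw [Option.map_eq_none_iff] at h
      cases j with
      | zero => simpa [List.isPrefixOf_iff_prefix] using hp
      | succ j => rw [List.drop_succ_cons]; exact ih h j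

theorem pvFirstOccSome (sep l : List Char) (hsep : sep ≠ []) (q : Nat)
    (h : pvFirstOcc sep l = some q) :
    sep <+: l.drop q ∧ (∀ j < q, ¬ sep <+: l.drop j) ∧ q + sep.length ≤ l.length := by
  induction l generalizing q with
  | nil => rw [pvFirstOcc] at h; cases h
  | cons c rest ih =>
    rw [pvFirstOcc] at h
    by_cases hp : sep.isPrefixOf (c :: rest)
    · rw [if_pos hp] at h
      cases h
      have hpre := List.isPrefixOf_iff_prefix.mp hp
      exact ⟨by simpa using hpre, by omega, by simpa using hpre.length_le⟩
    · rw [if_neg hp] at h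
      rw [Option.map_eq_some_iff] at h
      obtain ⟨q', hq', rfl⟩ := h
      obtain ⟨h1, h2, h3⟩ := ih q' hq'
      refine ⟨by simpa [List.drop_succ_cons] using h1, ?_, by simp; omega⟩
      intro j hj
      cases j with
      | zero => simpa [List.isPrefixOf_iff_prefix] using hp
      | succ j => rw [List.drop_succ_cons]; exact h2 j (by omega)

theorem pvFirstOccExists (sep l : List Char) (hsep : sep ≠ []) (j : Nat) (h : sep <+: l.drop j) :
    ∃ q, pvFirstOcc sep l = some q := by
  cases heq : pvFirstOcc sep l with
  | none => exact absurd h (pvFirstOccNone sep l hsep heq j)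
  | some q => exact ⟨q, rfl⟩

theorem pvSplitGo0 (sep l cur : List Char) (acc : List (List Char)) (fuel : Nat) :
    PySem.Chars.splitOnMax.go sep fuel 0 l cur acc = acc.reverse ++ [cur.reverse ++ l] := by
  cases fuel with
  | zero => rw [PySem.Chars.splitOnMax.go]; simp
  | succ f => cases l with
    | nil => rw [PySem.Chars.splitOnMax.go]; simp; omega
    | cons c rest => rw [PySem.Chars.splitOnMax.go]; simp

theorem pvSplitGo1 (sep : List Char) (hsep : sep ≠ []) :
    ∀ (fuel : Nat) (l cur : List Char) (acc : List (List Char)), l.length < fuel →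
    PySem.Chars.splitOnMax.go sep fuel 1 l cur acc =
      match pvFirstOcc sep l with
      | some q => acc.reverse ++ [cur.reverse ++ l.take q, l.drop (q + sep.length)]
      | none => acc.reverse ++ [cur.reverse ++ l] := by
  intro fuel
  induction fuel with
  | zero => intro l cur acc hlen; omega
  | succ f ih =>
    intro l cur acc hlen
    cases l with
    | nil =>
      rw [pvFirstOcc]
      rw [PySem.Chars.splitOnMax.go]
      simp
      omega
    | cons c rest =>
      by_cases hp : sep.isPrefixOf (c :: rest)
      · have hgo : PySem.Chars.splitOnMax.go sep (f+1) 1 (c :: rest) cur acc =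
            PySem.Chars.splitOnMax.go sep f 0 (List.drop sep.length (c :: rest)) []
              (cur.reverse :: acc) := by
          rw [PySem.Chars.splitOnMax.go]; simp [hp]
        rw [hgo, pvSplitGo0, pvFirstOcc, if_pos hp]
        simp
      · have hgo : PySem.Chars.splitOnMax.go sep (f+1) 1 (c :: rest) cur acc =
            PySem.Chars.splitOnMax.go sep f 1 rest (c :: cur) acc := by
          rw [PySem.Chars.splitOnMax.go]; simp [hp]
        rw [hgo, ih rest (c :: cur) acc (by simpa using Nat.lt_of_succ_lt_succ (by simpa using hlen)),
          pvFirstOcc, if_neg hp]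
        cases hro : pvFirstOcc sep rest with
        | none => simp
        | some q' => simp [List.take_succ_cons, List.drop_succ_cons, Nat.add_right_comm]

theorem pvSplitHead (s sep : List Char) (hsep : sep ≠ []) (q : Nat)
    (hq : pvFirstOcc sep s = some q) :
    PySem.Chars.splitOnMax s sep 1 = [s.take q, s.drop (q + sep.length)] := by
  rw [PySem.Chars.splitOnMax]
  rw [if_neg (by norm_num), show Int.toNat 1 = 1 from rfl]
  rw [pvSplitGo1 sep hsep (s.length + 1) s [] [] (by omega), hq]
  simp

-- ---- the invariant carried through A's pipeline ----

def pvInv (W : List Char) (ms : List (List Char)) (k L : Nat) : Prop :=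
  L ≤ k ∧ k ≤ W.length ∧
  PySem.Chars.rstrip (W.take L) = W.take L ∧
  (∃ ws, W.take k = W.take L ++ ws ∧ ∀ c ∈ ws, PySem.Chars.isspace c) ∧
  (∀ m ∈ ms, ∀ q, m <+: W.drop q → k < q + m.length) ∧
  (k = W.length ∨ ∃ c ∈ pvCandidates, c <+: W.drop k)

def pvMarkerOk (m : String) : Prop :=
  m.toList ≠ [] ∧ m.toList ∈ pvCandidates ∧
  PySem.Chars.isspace (m.toList.getLastD 'x') = false

theorem pvMarkersOk : ∀ m ∈ pvMarkers, pvMarkerOk m := by unfold pvMarkerOk pvMarkers; decide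

theorem pvCutCore (W : List Char) (hWl : PySem.Chars.lstrip W = W) (q0 : Nat)
    (hq0 : q0 ≤ W.length) :
    ∃ L', PySem.Chars.strip (W.take q0) = W.take L' ∧ L' ≤ q0 ∧
      PySem.Chars.rstrip (W.take L') = W.take L' ∧
      (∃ ws, W.take q0 = W.take L' ++ ws ∧ ∀ c ∈ ws, PySem.Chars.isspace c) := by
  have h1 : PySem.Chars.strip (W.take q0) = PySem.Chars.rstrip (W.take q0) := by
    rw [PySem.Chars.strip, pvLstripTake W q0 hWl]
  have hpre : PySem.Chars.rstrip (W.take q0) <+: W :=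
    (pvRstripPrefix _).trans (List.take_prefix q0 W)
  refine ⟨(PySem.Chars.rstrip (W.take q0)).length,
    h1.trans (List.prefix_iff_eq_take.mp hpre), ?_, ?_, ?_⟩
  · have := pvRstripLen (W.take q0)
    rw [List.length_take] at this
    omega
  · rw [← List.prefix_iff_eq_take.mp hpre]
    exact pvRstripIdem _
  · obtain ⟨ws, hdec, hws⟩ := pvRstripDecomp (W.take q0)
    rw [List.prefix_iff_eq_take.mp hpre] at hdec
    exact ⟨ws, hdec, hws⟩

theorem pvIsInTake (W : List Char) (L : Nat) (hL : L ≤ W.length) (m : String)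
    (hm : m.toList ≠ []) :
    PySem.Str.isIn m (String.ofList (W.take L)) = true ↔
      ∃ q, m.toList <+: W.drop q ∧ q + m.toList.length ≤ L := by
  rw [PySem.Str.isIn_iff_infix, String.toList_ofList, pvInfixIffDrop]
  constructor
  · rintro ⟨q, hq⟩
    exact ⟨q, (pvPrefixTakeDrop W m.toList L q hm).mp hq⟩
  · rintro ⟨q, h1, h2⟩
    exact ⟨q, (pvPrefixTakeDrop W m.toList L q hm).mpr ⟨h1, h2⟩⟩

theorem pvStepLemma (W : List Char) (hWl : PySem.Chars.lstrip W = W) (m : String)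
    (hm : pvMarkerOk m) (ms : List (List Char)) (k L : Nat) (hInv : pvInv W ms k L) :
    ∃ k' L', pvCutStep (String.ofList (W.take L)) m = String.ofList (W.take L') ∧
      pvInv W (ms ++ [m.toList]) k' L' := by
  obtain ⟨hLk, hkW, hfix, ⟨ws, hdec, hws⟩, hms, hcut⟩ := hInv
  obtain ⟨hmne, hmcand, hmlast⟩ := hm
  have hmlen : 0 < m.toList.length := List.length_pos_of_ne_nil hmne
  have hLW : L ≤ W.length := le_trans hLk hkW
  rw [pvCutStep]
  by_cases hin : PySem.Str.isIn m (String.ofList (W.take L)) = true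
  · rw [if_pos hin]
    obtain ⟨q1, hq1, hq1L⟩ := (pvIsInTake W L hLW m hmne).mp hin
    have hq1s : m.toList <+: (W.take L).drop q1 :=
      (pvPrefixTakeDrop W m.toList L q1 hmne).mpr ⟨hq1, hq1L⟩
    obtain ⟨q0, hq0⟩ := pvFirstOccExists m.toList (W.take L) hmne q1 hq1s
    obtain ⟨hocc, hmin, hlen⟩ := pvFirstOccSome m.toList (W.take L) hmne q0 hq0
    rw [List.length_take] at hlen
    have hq0L : q0 + m.toList.length ≤ L := by omega
    have hq0lt : q0 < L := by omega
    have hsplit := pvSplitHead (W.take L) m.toList hmne q0 hq0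
    have htake : (W.take L).take q0 = W.take q0 := by
      rw [List.take_take]; congr 1; omega
    have hchain : (((PySem.Str.splitMax? (String.ofList (W.take L)) m 1).getD []).getD 0 "")
        = String.ofList (W.take q0) := by
      rw [PySem.Str.splitMax?, String.toList_ofList, PySem.Chars.splitMax?,
        if_neg (by simpa [List.isEmpty_iff] using hmne), hsplit, htake]
      simp
    obtain ⟨L', hstrip, hL'q0, hfix', hdec'⟩ := pvCutCore W hWl q0 (by omega)
    refine ⟨q0, L', ?_, ?_, by omega, hfix', hdec', ?_, ?_⟩
    · rw [hchain, PySem.Str.strip, String.toList_ofList, hstrip]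
    · exact hL'q0
    · intro m' hm' q hq
      rcases List.mem_append.mp hm' with h | h
      · have := hms m' h q hq; omega
      · rw [List.mem_singleton] at h
        subst h
        by_contra hle
        have hqlt : q < q0 := by omega
        exact hmin q hqlt ((pvPrefixTakeDrop W m.toList L q hmne).mpr ⟨hq, by omega⟩)
    · right
      exact ⟨m.toList, hmcand, ((pvPrefixTakeDrop W m.toList L q0 hmne).mp hocc).1⟩
  · rw [if_neg hin]
    refine ⟨k, L, rfl, hLk, hkW, hfix, ⟨ws, hdec, hws⟩, ?_, hcut⟩
    intro m' hm' q hq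
    rcases List.mem_append.mp hm' with h | h
    · exact hms m' h q hq
    · rw [List.mem_singleton] at h
      subst h
      by_contra hle
      have hnotL : ¬ (q + m.toList.length ≤ L) := fun hc =>
        hin ((pvIsInTake W L hLW m hmne).mpr ⟨q, hq, hc⟩)
      have hqk : m.toList <+: (W.take k).drop q :=
        (pvPrefixTakeDrop W m.toList k q hmne).mpr ⟨hq, by omega⟩
      have := pvLastCharBound (W.take k) (W.take L) ws m.toList q hdec hws hqk hmne hmlast
      rw [List.length_take] at this
      omega

theorem pvFoldLemma (W : List Char) (hWl : PySem.Chars.lstrip W = W) :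
    ∀ (msl : List String) (ms : List (List Char)) (k L : Nat),
    (∀ m ∈ msl, pvMarkerOk m) → pvInv W ms k L →
    ∃ k' L', msl.foldl pvCutStep (String.ofList (W.take L)) = String.ofList (W.take L') ∧
      pvInv W (ms ++ msl.map (·.toList)) k' L' := by
  intro msl
  induction msl with
  | nil =>
    intro ms k L _ hInv
    exact ⟨k, L, rfl, by simpa using hInv⟩
  | cons mhd mtl ih =>
    intro ms k L hok hInv
    obtain ⟨k1, L1, hstep, hInv1⟩ :=
      pvStepLemma W hWl mhd (hok mhd (by simp)) ms k L hInv
    obtain ⟨k2, L2, hfold, hInv2⟩ :=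
      ih (ms ++ [mhd.toList]) k1 L1 (fun m hm => hok m (by simp [hm])) hInv1
    refine ⟨k2, L2, ?_, ?_⟩
    · rw [List.foldl_cons, hstep, hfold]
    · simpa [List.append_assoc] using hInv2

theorem pvNewlineLemma (W : List Char) (hWl : PySem.Chars.lstrip W = W)
    (ms : List (List Char)) (k L : Nat) (hInv : pvInv W ms k L) :
    ∃ k' L',
      (if PySem.Str.isIn "\n" (String.ofList (W.take L)) then
        PySem.Str.strip (((PySem.Str.splitMax? (String.ofList (W.take L)) "\n" 1).getD []).getD 0 "")
      else String.ofList (W.take L)) = String.ofList (W.take L') ∧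
      pvInv W ms k' L' ∧ (∀ q, ['\n'] <+: W.drop q → L' ≤ q) := by
  obtain ⟨hLk, hkW, hfix, ⟨ws, hdec, hws⟩, hms, hcut⟩ := hInv
  have hnlt : ("\n" : String).toList = ['\n'] := rfl
  have hnlne : ("\n" : String).toList ≠ [] := by simp [hnlt]
  have hLW : L ≤ W.length := le_trans hLk hkW
  by_cases hin : PySem.Str.isIn "\n" (String.ofList (W.take L)) = true
  · rw [if_pos hin]
    obtain ⟨q1, hq1, hq1L⟩ := (pvIsInTake W L hLW "\n" hnlne).mp hin
    have hq1s : ("\n" : String).toList <+: (W.take L).drop q1 :=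
      (pvPrefixTakeDrop W _ L q1 hnlne).mpr ⟨hq1, hq1L⟩
    obtain ⟨q0, hq0⟩ := pvFirstOccExists _ (W.take L) hnlne q1 hq1s
    obtain ⟨hocc, hmin, hlen⟩ := pvFirstOccSome _ (W.take L) hnlne q0 hq0
    rw [List.length_take, hnlt] at hlen
    simp only [List.length_singleton] at hlen
    have hq0lt : q0 < L := by omega
    have hsplit := pvSplitHead (W.take L) ("\n" : String).toList hnlne q0 hq0
    have htake : (W.take L).take q0 = W.take q0 := by
      rw [List.take_take]; congr 1; omega
    have hchain : (((PySem.Str.splitMax? (String.ofList (W.take L)) "\n" 1).getD []).getD 0 "")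
        = String.ofList (W.take q0) := by
      rw [PySem.Str.splitMax?, String.toList_ofList, PySem.Chars.splitMax?,
        if_neg (by simpa [List.isEmpty_iff] using hnlne), hsplit, htake]
      simp
    obtain ⟨L', hstrip, hL'q0, hfix', hdec'⟩ := pvCutCore W hWl q0 (by omega)
    refine ⟨q0, L', ?_, ⟨hL'q0, by omega, hfix', hdec', ?_, ?_⟩, ?_⟩
    · rw [hchain, PySem.Str.strip, String.toList_ofList, hstrip]
    · intro m' hm' q hq
      have := hms m' hm' q hq
      omega
    · right
      refine ⟨['\n'], by simp [pvCandidates], ?_⟩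
      have h5 := (pvPrefixTakeDrop W _ L q0 hnlne).mp hocc
      rw [hnlt] at h5
      exact h5.1
    · intro q hq
      by_contra hqL'
      have hqlt : q < q0 := by omega
      apply hmin q hqlt
      apply (pvPrefixTakeDrop W _ L q hnlne).mpr
      rw [hnlt]
      exact ⟨hq, by simp; omega⟩
  · rw [if_neg hin]
    refine ⟨k, L, rfl, ⟨hLk, hkW, hfix, ⟨ws, hdec, hws⟩, hms, hcut⟩, ?_⟩
    intro q hq
    by_contra hqL
    apply hin
    apply (pvIsInTake W L hLW "\n" hnlne).mpr
    rw [hnlt]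
    exact ⟨q, hq, by simp; omega⟩

-- ---- B's scan characterised ----

theorem pvFindCutNone (l : List Char) (n : Nat) (h : pvFindCut l n = none) :
    ∀ j, ∀ c ∈ pvCandidates, ¬ c <+: l.drop j := by
  induction l generalizing n with
  | nil =>
    intro j c hc hp
    rw [List.drop_nil] at hp
    exact pvCandidatesNeNil c hc (List.prefix_nil.mp hp)
  | cons a rest ih =>
    intro j c hc
    rw [pvFindCut] at h
    by_cases hany : pvCandidates.any (fun p => p.isPrefixOf (a :: rest)) = true
    · rw [if_pos hany] at h; cases h
    · rw [if_neg hany] at h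
      cases j with
      | zero =>
        intro hp
        exact hany (List.any_eq_true.mpr ⟨c, hc, List.isPrefixOf_iff_prefix.mpr (by simpa using hp)⟩)
      | succ j =>
        rw [List.drop_succ_cons]
        exact ih (n+1) h j c hc

theorem pvFindCutSome (l : List Char) (n i : Nat) (h : pvFindCut l n = some i) :
    n ≤ i ∧ (∃ c ∈ pvCandidates, c <+: l.drop (i - n)) ∧
      ∀ j < i - n, ∀ c ∈ pvCandidates, ¬ c <+: l.drop j := by
  induction l generalizing n with
  | nil => rw [pvFindCut] at h; cases h
  | cons a rest ih =>
    rw [pvFindCut] at h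
    by_cases hany : pvCandidates.any (fun p => p.isPrefixOf (a :: rest)) = true
    · rw [if_pos hany] at h
      cases h
      obtain ⟨c, hc, hp⟩ := List.any_eq_true.mp hany
      refine ⟨le_refl _, ⟨c, hc, by simpa using List.isPrefixOf_iff_prefix.mp hp⟩, by omega⟩
    · rw [if_neg hany] at h
      obtain ⟨h1, ⟨c, hc, hp⟩, hmin⟩ := ih (n+1) h
      refine ⟨by omega, ⟨c, hc, ?_⟩, ?_⟩
      · rw [show i - n = (i - (n+1)) + 1 by omega, List.drop_succ_cons]
        exact hp
      · intro j hj c' hc'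
        cases j with
        | zero =>
          intro hp'
          exact hany (List.any_eq_true.mpr ⟨c', hc',
            List.isPrefixOf_iff_prefix.mpr (by simpa using hp')⟩)
        | succ j =>
          rw [List.drop_succ_cons]
          exact hmin j (by omega) c' hc' 

-- ---- assembly ----

theorem pvMain (detail : String) :
    clean_guard_detail_py detail = clean_guard_detail_py_alt detail := by
  set W := PySem.Chars.strip detail.toList with hW
  have hWl : PySem.Chars.lstrip W = W := pvStripLstrip detail.toList
  have hWr : PySem.Chars.rstrip W = W := pvStripRstrip detail.toList
  have hstr : PySem.Str.strip detail = String.ofList W := rfl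
  have hInv0 : pvInv W [] W.length W.length := by
    refine ⟨le_refl _, le_refl _, ?_, ⟨[], by simp, by simp⟩, by simp, Or.inl rfl⟩
    rw [List.take_length]; exact hWr
  obtain ⟨k1, L1, hfold, hInv1⟩ :=
    pvFoldLemma W hWl pvMarkers [] W.length W.length pvMarkersOk hInv0
  obtain ⟨k2, L2, hnl, hInv2, hnlmin⟩ := pvNewlineLemma W hWl _ k1 L1 hInv1
  have hfold' : pvMarkers.foldl pvCutStep (PySem.Str.strip detail)
      = String.ofList (W.take L1) := by
    rw [hstr, show String.ofList W = String.ofList (W.take W.length) by rw [List.take_length]]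
    exact hfold
  have hA : clean_guard_detail_py detail = String.ofList (W.take L2) := by
    show (if PySem.Str.isIn "\n" (pvMarkers.foldl pvCutStep (PySem.Str.strip detail)) then
        PySem.Str.strip (((PySem.Str.splitMax?
          (pvMarkers.foldl pvCutStep (PySem.Str.strip detail)) "\n" 1).getD []).getD 0 "")
      else (pvMarkers.foldl pvCutStep (PySem.Str.strip detail))) = _
    rw [hfold']
    exact hnl
  obtain ⟨hL2k2, hk2W, hfix2, ⟨ws, hdec, hws⟩, hms2, hcut2⟩ := hInv2
  simp only [List.nil_append] at hms2
  have hBdef : clean_guard_detail_py_alt detail =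
      (match pvFindCut W 0 with
       | some i => String.ofList (PySem.Chars.rstrip (W.take i))
       | none => String.ofList W) := by
    show (match pvFindCut (PySem.Str.strip detail).toList 0 with
       | some i => String.ofList (PySem.Chars.rstrip ((PySem.Str.strip detail).toList.take i))
       | none => PySem.Str.strip detail) = _
    rw [hstr, String.toList_ofList]
  rw [hBdef]
  cases hfc : pvFindCut W 0 with
  | none =>
    have hnone := pvFindCutNone W 0 hfc
    have hk2 : k2 = W.length := by
      rcases hcut2 with h | ⟨c, hc, hp⟩
      · exact h
      · exact absurd hp (hnone k2 c hc)
    have hL2 : L2 = W.length := by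
      by_contra hne
      have hdecW : W = W.take L2 ++ ws := by
        rw [← hdec, hk2, List.take_length]
      have h1 := pvRstripAppendWs (W.take L2) ws hws
      rw [← hdecW, hWr] at h1
      have h2 := congrArg List.length h1
      have h3 := pvRstripLen (W.take L2)
      rw [List.length_take] at h3
      omega
    show clean_guard_detail_py detail = String.ofList W
    rw [hA, hL2, List.take_length]
  | some i =>
    obtain ⟨-, ⟨c, hc, hci⟩, hmins⟩ := pvFindCutSome W 0 i hfc
    simp only [Nat.sub_zero] at hci hmins
    have hcne : c ≠ [] := pvCandidatesNeNil c hc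
    have hclen : 0 < c.length := List.length_pos_of_ne_nil hcne
    have hcfit : i + c.length ≤ W.length := by
      have := hci.length_le
      rw [List.length_drop] at this
      omega
    have hik : i ≤ k2 := by
      by_contra hgt
      rcases hcut2 with h | ⟨c0, hc0, hp0⟩
      · omega
      · exact hmins k2 (by omega) c0 hc0 hp0
    have hLi : L2 ≤ i := by
      by_contra hlt
      have hmem : c ∈ pvMarkers.map (·.toList) ∨ c = ['\n'] := by
        simp only [pvCandidates, List.mem_cons, List.not_mem_nil, or_false] at hc
        rcases hc with h|h|h|h|h
        · exact Or.inl (by rw [h]; simp [pvMarkers])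
        · exact Or.inl (by rw [h]; simp [pvMarkers])
        · exact Or.inl (by rw [h]; simp [pvMarkers])
        · exact Or.inl (by rw [h]; simp [pvMarkers])
        · exact Or.inr (by rw [h]; rfl)
      rcases hmem with hmk | hnl'
      · have h4 := hms2 c hmk i hci
        rcases hcut2 with h | ⟨c0, hc0, hp0⟩
        · omega
        · exact pvOverlapFalse W c c0 hc hc0 i k2 hci hp0 (by omega) (by omega)
      · subst hnl'
        have := hnlmin i hci
        omega
    have hpump : PySem.Chars.rstrip (W.take i) = W.take L2 := by
      have hlenL2 : (W.take L2).length = L2 := by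
        rw [List.length_take]
        omega
      have h1 : W.take i = W.take L2 ++ ws.take (i - L2) := by
        have h2 : W.take i = (W.take k2).take i := by rw [List.take_take, min_eq_left hik]
        rw [h2, hdec, List.take_append, hlenL2, List.take_of_length_le (by omega)]
      rw [h1, pvRstripAppendWs _ _ (fun ch hch => hws ch (List.mem_of_mem_take hch)), hfix2]
    show clean_guard_detail_py detail = String.ofList (PySem.Chars.rstrip (W.take i))
    rw [hA, hpump]

-- ===== VERDICT (by name: the statement is the Claim_ definition above) =====
theorem clean_guard_detail_py_spec : Claim_equal_clean_guard_detail_py := by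
  intro detail _
  unfold Spec_clean_guard_detail_py
  exact pvMain detail
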